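-- pv_equiv track=rewrite | github.com/cfe-lab/MiCall | micall/utils/overlap_stitcher.py | disambiguate_concordance
-- ===== SOURCE A (Python) =====
-- from typing import Sequence, Iterator, Tuple, TypeVar
--
-- T = TypeVar("T")
--
-- def disambiguate_concordance(concordance: Sequence[T],
--                              ) -> Iterator[Tuple[T, int]]:
--     for i, x in enumerate(concordance):
--         if i < len(concordance) / 2:
--             global_rank = i
--         else:
--             global_rank = len(concordance) - i - 1
--         yield x, global_rank
-- ===== SOURCE B (Python) =====
-- def disambiguate_concordance(concordance):
--     # Build the folded-rank table by a two-pointer fill from both ends inward,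
--     # then emit one pass zipping elements with their precomputed ranks.
--     n = len(concordance)
--     ranks = [0] * n
--     for k in range((n + 1) // 2):
--         ranks[k] = k
--         ranks[n - 1 - k] = k
--     yield from zip(concordance, ranks)
-- ===== Notes on version B (the rewrite author's own statement) =====
-- stated objective: alternative
-- what changed: Replaces the inline per-element rank computation (branching on i < n/2 inside the enumerate loop) with a two-pointer table fill that assigns ranks from both ends inward, followed by a single zip-emitting pass.
import Mathlib
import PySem

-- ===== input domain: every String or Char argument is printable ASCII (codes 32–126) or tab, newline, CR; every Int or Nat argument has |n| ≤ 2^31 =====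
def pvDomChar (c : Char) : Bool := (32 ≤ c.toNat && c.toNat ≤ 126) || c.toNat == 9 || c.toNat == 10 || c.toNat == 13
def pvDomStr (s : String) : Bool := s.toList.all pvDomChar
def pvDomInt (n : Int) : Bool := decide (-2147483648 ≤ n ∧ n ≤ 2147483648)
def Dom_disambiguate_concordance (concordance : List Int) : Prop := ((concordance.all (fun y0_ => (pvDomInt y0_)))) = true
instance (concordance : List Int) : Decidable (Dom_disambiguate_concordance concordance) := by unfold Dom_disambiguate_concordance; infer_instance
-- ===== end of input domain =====

-- B replaces the inline per-index rank branch by a two-pointer table fill from both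
-- ends inward, then one zip-emitting pass (alternative decomposition, same cost).
-- A is a generator; equivalence is about the fully materialised sequence of yields.

-- ===== PORT A =====
-- 'i < len(concordance) / 2' uses exact float halving; on these magnitudes it is
-- exactly '2*i < len', which is how the comparison is ported.
def disambiguate_concordance (concordance : List Int) : List (Int × Int) :=
  (PySem.List.enumerate concordance).map (fun ix =>
    if 2 * ix.1 < (concordance.length : Int) then (ix.2, ix.1)
    else (ix.2, (concordance.length : Int) - ix.1 - 1))

-- ===== PORT B =====
def disambiguate_concordance_alt (concordance : List Int) : List (Int × Int) :=
  let n := concordance.length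
  let ranks := (List.range ((n + 1) / 2)).foldl
    (fun acc k => (acc.set k (k : Int)).set (n - 1 - k) (k : Int))
    (List.replicate n 0)
  concordance.zip ranks

-- ===== PRECONDITION & SPEC =====
def Spec_disambiguate_concordance (concordance : List Int) (out : List (Int × Int)) : Prop := out = disambiguate_concordance_alt concordance
instance (concordance : List Int) (out : List (Int × Int)) : Decidable (Spec_disambiguate_concordance concordance out) := by unfold Spec_disambiguate_concordance; infer_instance

-- ===== CLAIM (what is proved, stated in full; the proofs are below) =====
def Claim_equal_disambiguate_concordance : Prop := ∀ (concordance : List Int), Dom_disambiguate_concordance concordance → Spec_disambiguate_concordance concordance (disambiguate_concordance concordance)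

-- ===== LEMMAS AND PROOFS =====

-- the rank table B builds, abstracted over how many fill steps have run
def pvFill (n m : Nat) : List Int :=
  (List.range m).foldl
    (fun acc k => (acc.set k (k : Int)).set (n - 1 - k) (k : Int))
    (List.replicate n 0)

theorem pvFill_length (n m : Nat) : (pvFill n m).length = n := by
  induction m with
  | zero => simp [pvFill]
  | succ m ih =>
      simp only [pvFill, List.range_succ, List.foldl_append, List.foldl_cons, List.foldl_nil]
      simpa [pvFill] using ih

theorem pvFill_get (n m : Nat) (hm : m ≤ (n + 1) / 2) (j : Nat) (hj : j < n) :
    (pvFill n m)[j]? =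
      some (if j < m then (j : Int) else if n - m ≤ j then (n : Int) - 1 - j else 0) := by
  induction m with
  | zero =>
      simp [pvFill, hj]
  | succ m ih =>
      have hm' : m ≤ (n + 1) / 2 := by omega
      have hmn : m < n := by omega
      have hlen : (pvFill n m).length = n := pvFill_length n m
      have hstep : pvFill n (m + 1) = ((pvFill n m).set m (m : Int)).set (n - 1 - m) (m : Int) := by
        simp [pvFill, List.range_succ]
      rw [hstep, List.getElem?_set, List.getElem?_set, ih hm', List.length_set, hlen]
      split_ifs <;> first | rfl | (exfalso; omega) | (congr 1; omega)

theorem disambiguate_concordance_eq (concordance : List Int) :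
    disambiguate_concordance concordance = disambiguate_concordance_alt concordance := by
  have hBfill : disambiguate_concordance_alt concordance
      = concordance.zip (pvFill concordance.length ((concordance.length + 1) / 2)) := rfl
  set n := concordance.length with hn
  have hfillLen : (pvFill n ((n + 1) / 2)).length = n := pvFill_length n _
  have hAlen : (disambiguate_concordance concordance).length = n := by
    simp [disambiguate_concordance, PySem.List.length_enumerate, hn]
  have hBlen : (disambiguate_concordance_alt concordance).length = n := by
    rw [hBfill]; simp [List.length_zip, hfillLen]; omega
  apply List.ext_getElem (by omega)
  intro i h1 h2
  have hi : i < n := by omega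
  have hA : (disambiguate_concordance concordance)[i]'h1 =
      (if 2 * (i : Int) < (n : Int) then (concordance[i]'hi, (i : Int))
       else (concordance[i]'hi, (n : Int) - i - 1)) := by
    simp [disambiguate_concordance, List.getElem_map, PySem.List.getElem_enumerate, hn]
  have hr := pvFill_get n ((n + 1) / 2) (le_refl _) i hi
  have hrv : (pvFill n ((n + 1) / 2))[i]'(by omega) =
      (if i < (n + 1) / 2 then (i : Int) else if n - (n + 1) / 2 ≤ i then (n : Int) - 1 - i else 0) := by
    have := List.getElem?_eq_getElem (l := pvFill n ((n + 1) / 2)) (i := i) (by omega)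
    rw [this] at hr
    exact Option.some.inj hr
  have hB : (disambiguate_concordance_alt concordance)[i]'h2 =
      (concordance[i]'hi, (pvFill n ((n + 1) / 2))[i]'(by omega)) := by
    rw [List.getElem_of_eq hBfill h2]
    exact List.getElem_zip
  rw [hA, hB, hrv]
  split_ifs with h3 h4 h5 <;> first | rfl | (exfalso; omega) | (congr 1; omega)

-- ===== VERDICT (by name: the statement is the Claim_ definition above) =====
theorem disambiguate_concordance_spec : Claim_equal_disambiguate_concordance := by
  intro concordance _
  unfold Spec_disambiguate_concordance
  exact disambiguate_concordance_eq concordance
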